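-- pv_equiv track=rewrite | github.com/Napassawan/DataStructure | Code/Ex2.5.py | bon
-- ===== SOURCE A (Python) =====
-- def bon(w):
-- 	l = []
-- 	for letter in w:
--   		number = ord(letter) - 96
--   		l.append(number)
--
-- 	for i in range(len(l)):
--     	 for j in range(len(l)):
-- 			    if i < j:
-- 					   if l[i] == l[j]:
-- 						     ans = int(l[i])
-- 	ans *= 4
-- 	return ans
-- ===== SOURCE B (Python) =====
-- def bon(w):
--     # One right-to-left pass: the answer is the value at the largest index whose
--     # letter occurs again later; scanning from the right with a set of letters
--     # already seen (i.e. occurring later), the first hit is that index.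
--     seen = set()
--     for v in reversed([ord(c) - 96 for c in w]):
--         if v in seen:
--             return v * 4
--         seen.add(v)
-- ===== Notes on version B (the rewrite author's own statement) =====
-- stated objective: faster
-- what changed: Replaced A's quadratic double loop over all index pairs (whose last assignment wins) by a single right-to-left scan with a set of already-seen values, returning at the first value that occurs again later.
import Mathlib
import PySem

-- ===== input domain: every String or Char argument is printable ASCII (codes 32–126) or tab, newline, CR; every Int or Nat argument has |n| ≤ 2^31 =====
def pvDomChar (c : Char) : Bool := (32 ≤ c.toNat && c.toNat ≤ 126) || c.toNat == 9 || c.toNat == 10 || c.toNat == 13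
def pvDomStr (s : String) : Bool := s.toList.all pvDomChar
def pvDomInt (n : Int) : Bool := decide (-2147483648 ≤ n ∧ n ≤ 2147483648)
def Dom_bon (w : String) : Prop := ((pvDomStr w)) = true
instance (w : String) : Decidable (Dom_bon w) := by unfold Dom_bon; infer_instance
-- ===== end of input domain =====

-- B replaces A's quadratic double loop by one right-to-left pass with a set (faster);
-- on duplicate-free input Python A raises UnboundLocalError (excluded by Pre_bon).

-- ===== PORT A =====
def bon (w : String) : Int :=
  let l : List Int := w.toList.foldl (fun acc letter => acc ++ [((letter.toNat : Int) - 96)]) []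
  let ans : Option Int :=
    (PySem.List.pyRange 0 (l.length : Int) 1).foldl (fun a i =>
      (PySem.List.pyRange 0 (l.length : Int) 1).foldl (fun a j =>
        if i < j then
          if PySem.List.pyGetD l i 0 = PySem.List.pyGetD l j 0 then
            some (PySem.List.pyGetD l i 0)
          else a
        else a) a) none   -- the result variable is unbound before the loops
  match ans with
  | some v => v * 4
  | none => 0   -- Python A raises UnboundLocalError here; excluded by Pre_bon

-- ===== PORT B =====
def bonAltGo : List Int → PySem.Set Int → Option Int
  | [], _ => none
  | v :: t, seen =>
    if PySem.Set.contains seen v then some (v * 4)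
    else bonAltGo t (PySem.Set.add seen v)

def bon_alt (w : String) : Int :=
  match bonAltGo ((w.toList.map (fun c => ((c.toNat : Int) - 96))).reverse) PySem.Set.empty with
  | some r => r
  | none => 0   -- Python B returns None here; excluded by Pre_bon

-- ===== PRECONDITION & SPEC =====
-- Pre_bon excludes exactly the strings with no repeated character, on which Python A
-- never assigns its result variable and raises UnboundLocalError (and B returns None).
def Pre_bon (w : String) : Prop := ¬ w.toList.Nodup
instance (w : String) : Decidable (Pre_bon w) := by unfold Pre_bon; infer_instance

def pvWitness_bon : String := "abca"

def Spec_bon (w : String) (out : Int) : Prop := out = bon_alt w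
instance (w : String) (out : Int) : Decidable (Spec_bon w out) := by unfold Spec_bon; infer_instance

-- ===== CLAIM (what is proved, stated in full; the proofs are below) =====
def Claim_equal_bon : Prop := ∀ (w : String), Dom_bon w → Pre_bon w → Spec_bon w (bon w)

-- ===== LEMMAS AND PROOFS =====

-- "l[i] occurs again at a later index" (as A's inner loop tests it)
def hasLater (l : List Int) (i : Int) : Bool :=
  (PySem.List.pyRange 0 (l.length : Int) 1).any
    (fun j => decide (i < j) && decide (PySem.List.pyGetD l i 0 = PySem.List.pyGetD l j 0))

-- the predicate B's scan effectively tests at index i of the full list, seen-set s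
def scanQ (l : List Int) (s : List Int) (i : Int) : Bool :=
  hasLater l i || decide (PySem.List.pyGetD l i 0 ∈ s)

theorem find?_congr' {α : Type} (xs : List α) (p q : α → Bool)
    (h : ∀ x ∈ xs, p x = q x) : xs.find? p = xs.find? q := by
  induction xs with
  | nil => rfl
  | cons x t ih =>
    simp only [List.find?]
    rw [h x (by simp)]
    cases q x
    · exact ih (fun y hy => h y (by simp [hy]))
    · rfl

theorem foldl_if_const {α : Type} (js : List α) (p : α → Bool) (v a : Option Int) :
    js.foldl (fun acc j => if p j then v else acc) a = if js.any p then v else a := by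
  induction js generalizing a with
  | nil => simp
  | cons j t ih =>
    simp only [List.foldl, List.any_cons]
    rw [ih]
    rcases Bool.eq_false_or_eq_true (p j) with hp | hp <;> simp [hp]

theorem foldl_if_last {α : Type} (js : List α) (q : α → Bool) (vf : α → Option Int) (a : Option Int) :
    js.foldl (fun acc i => if q i then vf i else acc) a =
      (match js.reverse.find? q with | some i => vf i | none => a) := by
  induction js using List.reverseRecOn generalizing a with
  | nil => rfl
  | append_singleton t i ih =>
    rw [List.foldl_append]
    simp only [List.foldl, List.reverse_append, List.reverse_cons, List.reverse_nil,
      List.nil_append, List.cons_append, List.find?]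
    cases hq : q i
    · simp only [Bool.false_eq_true, if_false]; exact ih a
    · simp

-- A's double loop computes: the value at the LAST index having a later duplicate
theorem A_char (l : List Int) :
    (PySem.List.pyRange 0 (l.length : Int) 1).foldl (fun a i =>
      (PySem.List.pyRange 0 (l.length : Int) 1).foldl (fun a j =>
        if i < j then
          if PySem.List.pyGetD l i 0 = PySem.List.pyGetD l j 0 then
            some (PySem.List.pyGetD l i 0)
          else a
        else a) a) none =
    (match (PySem.List.pyRange 0 (l.length : Int) 1).reverse.find? (hasLater l) with
     | some i => some (PySem.List.pyGetD l i 0)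
     | none => none) := by
  have hinner : ∀ (i : Int) (a : Option Int),
      (PySem.List.pyRange 0 (l.length : Int) 1).foldl (fun a j =>
        if i < j then
          if PySem.List.pyGetD l i 0 = PySem.List.pyGetD l j 0 then
            some (PySem.List.pyGetD l i 0)
          else a
        else a) a =
      if hasLater l i then some (PySem.List.pyGetD l i 0) else a := by
    intro i a
    have hfun : (fun (a : Option Int) (j : Int) =>
        if i < j then
          if PySem.List.pyGetD l i 0 = PySem.List.pyGetD l j 0 then
            some (PySem.List.pyGetD l i 0)
          else a
        else a) =
        (fun (a : Option Int) (j : Int) =>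
          if (decide (i < j) && decide (PySem.List.pyGetD l i 0 = PySem.List.pyGetD l j 0)) then
            some (PySem.List.pyGetD l i 0)
          else a) := by
      funext a j
      by_cases h1 : i < j <;> by_cases h2 : PySem.List.pyGetD l i 0 = PySem.List.pyGetD l j 0 <;>
        simp [h1, h2]
    rw [hfun, foldl_if_const]
    rfl
  have hfun2 : (fun (a : Option Int) (i : Int) =>
      (PySem.List.pyRange 0 (l.length : Int) 1).foldl (fun a j =>
        if i < j then
          if PySem.List.pyGetD l i 0 = PySem.List.pyGetD l j 0 then
            some (PySem.List.pyGetD l i 0)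
          else a
        else a) a) =
      (fun (a : Option Int) (i : Int) =>
        if hasLater l i then some (PySem.List.pyGetD l i 0) else a) := by
    funext a i; exact hinner i a
  rw [hfun2, foldl_if_last]
  cases (PySem.List.pyRange 0 (l.length : Int) 1).reverse.find? (hasLater l) <;> rfl

theorem pyGetD_append_lt (t' : List Int) (x : Int) (i : Int) (h0 : 0 ≤ i)
    (h1 : i < (t'.length : Int)) :
    PySem.List.pyGetD (t' ++ [x]) i 0 = PySem.List.pyGetD t' i 0 := by
  rw [PySem.List.pyGetD_eq_getElem (t' ++ [x]) 0 h0 (by simp; omega),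
      PySem.List.pyGetD_eq_getElem t' 0 h0 h1]
  exact List.getElem_append_left (by omega)

theorem pyGetD_append_len (t' : List Int) (x : Int) :
    PySem.List.pyGetD (t' ++ [x]) (t'.length : Int) 0 = x := by
  rw [PySem.List.pyGetD_natCast]
  simp [List.getD]

theorem hasLater_last (t' : List Int) (x : Int) :
    hasLater (t' ++ [x]) (t'.length : Int) = false := by
  unfold hasLater
  refine List.any_eq_false.mpr ?_
  intro j hj
  have hb := PySem.List.mem_pyRange_one.mp hj
  have hlt : ¬ ((t'.length : Int) < j) := by
    have := hb.2
    simp only [List.length_append, List.length_cons, List.length_nil] at this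
    omega
  simp [hlt]

theorem hasLater_append (t' : List Int) (x : Int) (i : Int) (h0 : 0 ≤ i)
    (h1 : i < (t'.length : Int)) :
    hasLater (t' ++ [x]) i =
      (hasLater t' i || decide (PySem.List.pyGetD t' i 0 = x)) := by
  unfold hasLater
  rw [pyGetD_append_lt t' x i h0 h1]
  have hlen : (((t' ++ [x]).length : Nat) : Int) = (t'.length : Int) + 1 := by simp
  rw [hlen, PySem.List.pyRange_one_succ_right (by positivity), List.any_append]
  have hcong : ∀ j ∈ PySem.List.pyRange 0 (t'.length : Int) 1,
      (decide (i < j) && decide (PySem.List.pyGetD t' i 0 = PySem.List.pyGetD (t' ++ [x]) j 0)) =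
      (decide (i < j) && decide (PySem.List.pyGetD t' i 0 = PySem.List.pyGetD t' j 0)) := by
    intro j hj
    have hb := PySem.List.mem_pyRange_one.mp hj
    rw [pyGetD_append_lt t' x j hb.1 hb.2]
  rw [PySem.List.any_congr_mem hcong]
  simp only [List.any_cons, List.any_nil, Bool.or_false]
  rw [pyGetD_append_len]
  have : decide (i < (t'.length : Int)) = true := by simpa using h1
  rw [this, Bool.true_and]

-- B's scan computes: for the full list rl.reverse scanned from the right with seen-set s,
-- the value*4 at the LAST index i with (later duplicate, or value already in s)
theorem B_char (rl : List Int) : ∀ (s : PySem.Set Int),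
    bonAltGo rl s =
      (match (PySem.List.pyRange 0 (rl.reverse.length : Int) 1).reverse.find? (scanQ rl.reverse s) with
       | some i => some (PySem.List.pyGetD rl.reverse i 0 * 4)
       | none => none) := by
  induction rl with
  | nil =>
    intro s
    simp [bonAltGo, PySem.List.pyRange_one_eq_nil]
  | cons x t ih =>
    intro s
    simp only [bonAltGo, List.reverse_cons]
    have hlen : (((t.reverse ++ [x]).length : Nat) : Int) = ((t.reverse.length : Nat) : Int) + 1 := by
      simp
    rw [hlen, PySem.List.pyRange_one_succ_right (by positivity)]
    simp only [List.reverse_append, List.reverse_cons, List.reverse_nil, List.nil_append,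
      List.singleton_append, List.find?]
    have hq0 : scanQ (t.reverse ++ [x]) s ((t.reverse.length : Nat) : Int) = PySem.Set.contains s x := by
      unfold scanQ
      rw [hasLater_last, pyGetD_append_len, Bool.false_or]
      cases hc : PySem.Set.contains s x
      · have : ¬ x ∈ s := fun hx => by
          rw [(PySem.Set.contains_iff s x).mpr hx] at hc; exact Bool.true_eq_false.mp hc
        simp [this]
      · simp [(PySem.Set.contains_iff s x).mp hc]
    rw [hq0]
    cases hc : PySem.Set.contains s x
    · simp only [Bool.false_eq_true, if_false]
      have hnx : ¬ x ∈ s := fun hx => by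
        rw [(PySem.Set.contains_iff s x).mpr hx] at hc; exact Bool.true_eq_false.mp hc
      have hcong : ∀ i ∈ (PySem.List.pyRange 0 ((t.reverse.length : Nat) : Int) 1).reverse,
          scanQ (t.reverse ++ [x]) s i = scanQ t.reverse (PySem.Set.add s x) i := by
        intro i hi
        rw [List.mem_reverse] at hi
        have hb := PySem.List.mem_pyRange_one.mp hi
        unfold scanQ
        rw [hasLater_append t.reverse x i hb.1 hb.2, pyGetD_append_lt t.reverse x i hb.1 hb.2]
        have hmem : (PySem.List.pyGetD t.reverse i 0 ∈ PySem.Set.add s x) ↔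
            (PySem.List.pyGetD t.reverse i 0 ∈ s ∨ PySem.List.pyGetD t.reverse i 0 = x) :=
          PySem.Set.mem_add s x (PySem.List.pyGetD t.reverse i 0)
        by_cases h1 : PySem.List.pyGetD t.reverse i 0 = x <;>
          by_cases h2 : PySem.List.pyGetD t.reverse i 0 ∈ s <;>
            simp [h1, h2, hmem]
      rw [find?_congr' _ _ _ hcong, ih (PySem.Set.add s x)]
      cases hf : (PySem.List.pyRange 0 ((t.reverse.length : Nat) : Int) 1).reverse.find?
          (scanQ t.reverse (PySem.Set.add s x))
      · rfl
      · rename_i i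
        have hi := List.mem_of_find?_eq_some hf
        rw [List.mem_reverse] at hi
        have hb := PySem.List.mem_pyRange_one.mp hi
        simp only []
        rw [pyGetD_append_lt t.reverse x i hb.1 hb.2]
    · simp only [if_true]
      rw [pyGetD_append_len]

-- ===== VERDICT (by name: the statement is the Claim_ definition above) =====
theorem bon_spec : Claim_equal_bon := by
  intro w _ _
  unfold Spec_bon bon bon_alt
  rw [PySem.List.foldl_append_singleton_eq_map]
  simp only [List.nil_append]
  set l : List Int := w.toList.map (fun c => ((c.toNat : Int) - 96)) with hl
  rw [B_char, List.reverse_reverse]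
  rw [A_char]
  have hq : ∀ i ∈ (PySem.List.pyRange 0 (l.length : Int) 1).reverse,
      scanQ l PySem.Set.empty i = hasLater l i := by
    intro i _
    unfold scanQ
    simp [PySem.Set.empty]
  rw [find?_congr' _ _ _ hq]
  cases hfind : (PySem.List.pyRange 0 (l.length : Int) 1).reverse.find? (hasLater l) <;> simp
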